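-- pv_equiv track=rewrite | github.com/pedroarthurfa08/Desenvolvimento-Sistemas | 3º Modulo/DOT/lista_03/list03_q10.py | maior_soma_repetidos
-- ===== SOURCE A (Python) =====
-- def maior_soma_repetidos(numeros):
--     # Primeiro, conta quantas vezes cada número aparece
--     contagem = {}
--     for num in numeros:
--         contagem[num] = contagem.get(num, 0) + 1
--
--     # Calcula a soma apenas para números que aparecem mais de uma vez
--     somas = {}
--     for num, quantidade in contagem.items():
--         if quantidade > 1:  # Só considera números que se repetem
--             somas[num] = num * quantidade
--
--     # Se não houver números repetidos, retorna 0
--     if not somas: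
--         return 0
--
--     return max(somas.values())
-- ===== SOURCE B (Python) =====
-- def maior_soma_repetidos(numeros):
--     # single pass over the sorted list, tracking runs of equal values
--     melhor = None
--     atual = None
--     vezes = 0
--     for x in sorted(numeros):
--         if vezes > 0 and x == atual:
--             vezes += 1
--         else:
--             if vezes > 1:
--                 p = atual * vezes
--                 if melhor is None or p > melhor:
--                     melhor = p
--             atual = x
--             vezes = 1
--     if vezes > 1:
--         p = atual * vezes
--         if melhor is None or p > melhor:
--             melhor = p
--     return 0 if melhor is None else melhor
-- ===== Notes on version B (the rewrite author's own statement) =====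
-- stated objective: alternative
-- what changed: Replaces the two dict-building passes (a counter dict, then a dict of products, then max over its values) by sorting a copy and scanning consecutive equal runs once, keeping a running maximum of value*run_length for runs longer than 1.
import Mathlib
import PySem

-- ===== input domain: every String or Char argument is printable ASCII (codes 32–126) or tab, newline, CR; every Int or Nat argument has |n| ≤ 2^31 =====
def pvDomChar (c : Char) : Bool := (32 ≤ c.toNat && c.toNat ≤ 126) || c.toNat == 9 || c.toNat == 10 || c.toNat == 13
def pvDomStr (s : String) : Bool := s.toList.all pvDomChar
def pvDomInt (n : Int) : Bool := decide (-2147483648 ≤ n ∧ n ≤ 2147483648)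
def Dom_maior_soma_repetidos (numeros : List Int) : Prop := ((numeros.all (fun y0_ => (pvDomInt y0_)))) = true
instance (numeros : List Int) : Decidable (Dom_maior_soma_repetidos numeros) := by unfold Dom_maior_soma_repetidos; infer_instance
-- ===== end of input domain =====

-- B replaces A's two dicts by a sort followed by one scan over consecutive equal runs (alternative algorithm, same results).

-- ===== PORT A =====
def maior_soma_repetidos (numeros : List Int) : Int :=
  -- contagem = {}; for num in numeros: contagem[num] = contagem.get(num, 0) + 1
  let contagem : PySem.Dict Int Int :=
    numeros.foldl (fun d num => d.insert num (d.getD num 0 + 1)) PySem.Dict.empty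
  -- somas = {}; for num, quantidade in contagem.items(): if quantidade > 1: somas[num] = num * quantidade
  let somas : PySem.Dict Int Int :=
    contagem.items.foldl
      (fun d p => if p.2 > 1 then d.insert p.1 (p.1 * p.2) else d) PySem.Dict.empty
  -- if not somas: return 0
  if somas.items = [] then 0
  -- return max(somas.values())
  else (PySem.List.max? somas.values (fun v => v)).getD 0

-- ===== PORT B =====
-- if melhor is None or p > melhor: melhor = p
def pvUpd (melhor : Option Int) (p : Int) : Option Int :=
  match melhor with
  | none => some p
  | some b => if p > b then some p else some b

-- the 'if vezes > 1: …' block that closes a run (atual is always set when vezes > 1)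
def pvFlush (melhor : Option Int) (atual : Option Int) (vezes : Int) : Option Int :=
  if vezes > 1 then
    match atual with
    | some a => pvUpd melhor (a * vezes)
    | none => melhor
  else melhor

-- the body of 'for x in sorted(numeros)': state = (melhor, atual, vezes)
def pvStep (st : Option Int × Option Int × Int) (x : Int) : Option Int × Option Int × Int :=
  if st.2.2 > 0 ∧ st.2.1 = some x then (st.1, st.2.1, st.2.2 + 1)
  else (pvFlush st.1 st.2.1 st.2.2, some x, 1)

def maior_soma_repetidos_alt (numeros : List Int) : Int :=
  let st := (PySem.List.sorted numeros (fun v => v) false).foldl pvStep (none, none, 0)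
  let melhor := pvFlush st.1 st.2.1 st.2.2
  -- return 0 if melhor is None else melhor
  melhor.getD 0

-- ===== PRECONDITION & SPEC =====
def Spec_maior_soma_repetidos (numeros : List Int) (out : Int) : Prop := out = maior_soma_repetidos_alt numeros
instance (numeros : List Int) (out : Int) : Decidable (Spec_maior_soma_repetidos numeros out) := by unfold Spec_maior_soma_repetidos; infer_instance

-- ===== CLAIM (what is proved, stated in full; the proofs are below) =====
def Claim_equal_maior_soma_repetidos : Prop := ∀ (numeros : List Int), Dom_maior_soma_repetidos numeros → Spec_maior_soma_repetidos numeros (maior_soma_repetidos numeros)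

-- ===== LEMMAS AND PROOFS =====

-- products of repeated values (one entry per distinct value of l, first-occurrence order)
def pvProds (l : List Int) : List Int :=
  ((PySem.List.dedup l).filter (fun k => decide ((1 : Int) < (l.count k : Int)))).map
    (fun k => k * (l.count k : Int))

lemma pvUpd_eq (b : Option Int) (p : Int) : pvUpd b p = some (max (b.getD p) p) := by
  rcases b with _ | b
  · simp [pvUpd]
  · simp only [pvUpd, Option.getD_some, max_def]
    split_ifs <;> first | rfl | (exfalso; omega) | (congr 1; omega)

lemma pvUpd_rcomm (b : Option Int) (p q : Int) : pvUpd (pvUpd b p) q = pvUpd (pvUpd b q) p := by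
  rcases b with _ | b
  · rw [show pvUpd none p = some p from rfl, show pvUpd none q = some q from rfl,
        pvUpd_eq, pvUpd_eq]
    simp only [Option.getD_some]
    rw [max_comm]
  · simp only [pvUpd_eq, Option.getD_some]
    rw [max_right_comm]

lemma foldl_pvUpd_some (t : List Int) (x : Int) :
    t.foldl pvUpd (some x) = some (t.foldl max x) := by
  induction t generalizing x with
  | nil => rfl
  | cons y t ih =>
      have : pvUpd (some x) y = some (max x y) := by
        simp only [pvUpd, max_def]; split_ifs <;> simp_all <;> omega
      simp [List.foldl_cons, this, ih]

lemma dedup_filter (p : Int → Bool) (l : List Int) :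
    PySem.List.dedup (l.filter p) = (PySem.List.dedup l).filter p := by
  simp only [PySem.List.dedup_eq_ofList]
  induction l with
  | nil => rfl
  | cons x t ih =>
      by_cases hp : p x
      · simp only [List.filter_cons, hp, if_true, PySem.Set.ofList_cons, ih, PySem.Set.discard]
        rw [List.filter_comm]
      · simp only [List.filter_cons, hp, Bool.false_eq_true, if_false, PySem.Set.ofList_cons, ih,
          PySem.Set.discard]
        rw [List.filter_filter]
        refine (List.filter_congr ?_).symm
        intro a _
        by_cases hax : a = x
        · subst hax; simp [hp]
        · simp [hax]

lemma pvProds_cons (x : Int) (t : List Int) :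
    pvProds (x :: t) =
      (if (1 : Int) < 1 + (t.count x : Int) then [x * (1 + (t.count x : Int))] else []) ++
        pvProds (t.filter (fun y => !(y == x))) := by
  set q : Int → Bool := fun y => !(y == x) with hq
  set u := t.filter q with hu
  have hcnt : ∀ k ∈ (PySem.List.dedup t).filter q,
      (((x :: t).count k : Int)) = ((u.count k : Int)) := by
    intro k hk
    have hkx : k ≠ x := by
      have := (List.mem_filter.mp hk).2
      simpa [hq] using this
    have h1 : (x :: t).count k = t.count k := by
      rw [List.count_cons]; simp [Ne.symm hkx]
    have h2 : u.count k = t.count k := by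
      rw [hu]; exact List.count_filter (by simpa [hq] using hkx)
    rw [h1, h2]
  have hded : PySem.List.dedup (x :: t) = x :: (PySem.List.dedup t).filter q := by
    simp only [PySem.List.dedup_eq_ofList, PySem.Set.ofList_cons, PySem.Set.discard, hq]
  have hdedu : PySem.List.dedup u = (PySem.List.dedup t).filter q := by
    rw [hu]; exact dedup_filter q t
  unfold pvProds
  rw [hded, hdedu, List.filter_cons]
  have hT : ((PySem.List.dedup t).filter q).filter
        (fun k => decide ((1 : Int) < ((x :: t).count k : Int)))
      = ((PySem.List.dedup t).filter q).filter
        (fun k => decide ((1 : Int) < (u.count k : Int))) :=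
    List.filter_congr (fun k hk => by rw [hcnt k hk])
  rw [hT]
  have hcx2 : (((x :: t).count x : Int)) = 1 + (t.count x : Int) := by
    rw [List.count_cons_self]; push_cast; ring
  have hmap : ∀ T, T = ((PySem.List.dedup t).filter q).filter
        (fun k => decide ((1 : Int) < (u.count k : Int))) →
      T.map (fun k => k * (((x :: t).count k : Int))) = T.map (fun k => k * ((u.count k : Int))) := by
    intro T hTdef
    refine List.map_congr_left (fun k hk => ?_)
    rw [hcnt k (List.mem_of_mem_filter (hTdef ▸ hk))]
  by_cases hc : (1 : Int) < 1 + (t.count x : Int)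
  · have hd : decide ((1 : Int) < (((x :: t).count x : Int))) = true := by
      rw [hcx2]; exact decide_eq_true hc
    rw [hd, if_pos rfl, if_pos hc, List.map_cons, hcx2, List.singleton_append]
    congr 1
    exact hmap _ rfl
  · have hd : decide ((1 : Int) < (((x :: t).count x : Int))) = false := by
      rw [hcx2]; exact decide_eq_false hc
    rw [hd, if_neg hc, List.nil_append]
    simp only [Bool.false_eq_true, if_false]
    exact hmap _ rfl

lemma pvFlush_eq_foldl (best : Option Int) (c cnt : Int) :
    pvFlush best (some c) cnt =
      (if (1 : Int) < cnt then [c * cnt] else []).foldl pvUpd best := by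
  by_cases h : (1 : Int) < cnt
  · rw [if_pos h]; simp [pvFlush, h]
  · rw [if_neg h]; simp [pvFlush, h]

-- main loop invariant: scanning the sorted remainder t with an open run (c, cnt)
lemma pvScan (t : List Int) (best : Option Int) (c cnt : Int)
    (hs : t.Pairwise (· ≤ ·)) (hle : ∀ x ∈ t, c ≤ x) (hcnt : 1 ≤ cnt) :
    (fun st : Option Int × Option Int × Int => pvFlush st.1 st.2.1 st.2.2)
        (t.foldl pvStep (best, some c, cnt)) =
      ((if (1 : Int) < cnt + (t.count c : Int) then [c * (cnt + (t.count c : Int))] else []) ++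
        pvProds (t.filter (fun y => !(y == c)))).foldl pvUpd best := by
  induction t generalizing best c cnt with
  | nil =>
      have hp : pvProds ([] : List Int) = [] := rfl
      simp only [List.foldl_nil, List.count_nil, List.filter_nil, Nat.cast_zero, add_zero, hp,
        List.append_nil]
      exact pvFlush_eq_foldl best c cnt
  | cons x t ih =>
      rcases eq_or_ne x c with rfl | hxc
      · -- same value: extend the run
        have hstep : pvStep (best, some x, cnt) x = (best, some x, cnt + 1) := by
          simp [pvStep]; omega
        rw [List.foldl_cons, hstep,
            ih best x (cnt + 1) hs.of_cons (fun y hy => hle y (List.mem_cons_of_mem _ hy)) (by omega)]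
        rw [List.filter_cons]
        simp only [List.count_cons_self, beq_self_eq_true, Bool.not_true, Bool.false_eq_true,
          if_false]
        have : cnt + 1 + (t.count x : Int) = cnt + ((t.count x : Nat) + 1 : Nat) := by
          push_cast; ring
        rw [this]
      · -- run ends: flush and start a new run at x
        have hcx : c < x := lt_of_le_of_ne (hle x List.mem_cons_self) (Ne.symm hxc)
        have hnotin : c ∉ (x :: t) := by
          intro hc
          rcases List.mem_cons.mp hc with rfl | hc
          · exact absurd rfl hxc.symm
          · have := (List.pairwise_cons.mp hs).1 c hc
            omega
        have hstep : pvStep (best, some c, cnt) x = (pvFlush best (some c) cnt, some x, 1) := by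
          simp [pvStep]
          intro _ h; exact absurd h.symm hxc
        rw [List.foldl_cons, hstep,
            ih (pvFlush best (some c) cnt) x 1 hs.of_cons
              (fun y hy => List.rel_of_pairwise_cons hs hy) le_rfl]
        have hcount0 : (x :: t).count c = 0 := List.count_eq_zero.mpr hnotin
        have hfself : (x :: t).filter (fun y => !(y == c)) = x :: t := by
          apply List.filter_eq_self.mpr
          intro a ha
          simp only [Bool.not_eq_eq_eq_not, Bool.not_true, beq_eq_false_iff_ne]
          rintro rfl; exact hnotin ha
        rw [hfself, hcount0, pvProds_cons, pvFlush_eq_foldl, ← List.foldl_append,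
            ← List.append_assoc]
        norm_num

-- pvProds of the sorted copy is a permutation of A's products list
lemma pvProds_sorted_perm (numeros : List Int) :
    (pvProds (PySem.List.sorted numeros (fun v => v) false)).Perm
      (((PySem.Set.ofList numeros).filter
          (fun k => decide ((1 : Int) < (numeros.count k : Int)))).map
        (fun k => k * (numeros.count k : Int))) := by
  have hperm : (PySem.List.sorted numeros (fun v => v) false).Perm numeros :=
    PySem.List.sorted_perm numeros (fun v => v) false
  have hcnt : ∀ k, ((PySem.List.sorted numeros (fun v => v) false).count k) = numeros.count k :=
    fun k => hperm.count_eq k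
  have hdperm : (PySem.List.dedup (PySem.List.sorted numeros (fun v => v) false)).Perm
      (PySem.Set.ofList numeros) := by
    rw [PySem.List.dedup_eq_ofList]
    refine (List.perm_ext_iff_of_nodup (PySem.Set.nodup_ofList _) (PySem.Set.nodup_ofList _)).mpr ?_
    intro a
    rw [PySem.Set.mem_ofList, PySem.Set.mem_ofList, PySem.List.mem_sorted]
  unfold pvProds
  rw [List.filter_congr (fun k _ => by rw [hcnt k])]
  rw [List.map_congr_left
        (fun k _ => by rw [hcnt k] :
          ∀ k ∈ (PySem.List.dedup (PySem.List.sorted numeros (fun v => v) false)).filter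
              (fun k => decide ((1 : Int) < (numeros.count k : Int))),
            k * (((PySem.List.sorted numeros (fun v => v) false).count k : Int)) =
              k * ((numeros.count k : Int)))]
  exact (hdperm.filter _).map _

-- A's result written as a fold of pvUpd over its products list
lemma maior_A_eq (numeros : List Int) :
    maior_soma_repetidos numeros =
      ((((PySem.Set.ofList numeros).filter
          (fun k => decide ((1 : Int) < (numeros.count k : Int)))).map
        (fun k => k * (numeros.count k : Int))).foldl pvUpd none).getD 0 := by
  have hff : ∀ (l : List (Int × Int)) (d : PySem.Dict Int Int),
      l.foldl (fun d p => if p.2 > 1 then d.insert p.1 (p.1 * p.2) else d) d =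
        (l.filter (fun p => decide (p.2 > 1))).foldl (fun d p => d.insert p.1 (p.1 * p.2)) d := by
    intro l
    induction l with
    | nil => intro d; rfl
    | cons p l ih =>
        intro d
        by_cases h : p.2 > 1 <;> simp [h, ih]
  simp only [maior_soma_repetidos]
  rw [PySem.Dict.foldl_insert_getD_add_one_eq_counter, hff, PySem.Dict.items_counter,
      List.filter_map]
  have hcomp : ((fun p : Int × Int => decide (p.2 > 1)) ∘
        (fun k : Int => (k, (numeros.count k : Int)))) =
      fun k : Int => decide ((1 : Int) < (numeros.count k : Int)) := by
    funext k; rfl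
  rw [hcomp]
  have hitems :
      ((((PySem.Set.ofList numeros).filter
            (fun k => decide ((1 : Int) < (numeros.count k : Int)))).map
          (fun k => (k, (numeros.count k : Int)))).foldl
        (fun (d : PySem.Dict Int Int) p => d.insert p.1 (p.1 * p.2)) PySem.Dict.empty).items
      = ((PySem.Set.ofList numeros).filter
            (fun k => decide ((1 : Int) < (numeros.count k : Int)))).map
          (fun k => (k, k * (numeros.count k : Int))) := by
    rw [PySem.Dict.items_foldl_insert_fresh _ Prod.fst (fun p => p.1 * p.2) _
          (fun a _ => PySem.Dict.contains_empty a.1) ?nodup]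
    · simp [Function.comp_def, show PySem.Dict.empty.items = ([] : List (Int × Int)) from rfl]
    case nodup =>
      rw [List.map_map]
      have : (((PySem.Set.ofList numeros).filter
            (fun k => decide ((1 : Int) < (numeros.count k : Int)))).map
          (Prod.fst ∘ fun k => (k, (numeros.count k : Int))))
          = (PySem.Set.ofList numeros).filter
            (fun k => decide ((1 : Int) < (numeros.count k : Int))) := by
        simp [Function.comp_def]
      rw [this]
      exact (PySem.Set.nodup_ofList numeros).filter _
  simp only [PySem.Dict.values]
  rw [hitems, List.map_map]
  have hsnd : ((Prod.snd : Int × Int → Int) ∘ fun k => (k, k * (numeros.count k : Int)))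
      = fun k : Int => k * (numeros.count k : Int) := by
    funext k; rfl
  rw [hsnd]
  cases hP : (PySem.Set.ofList numeros).filter
      (fun k => decide ((1 : Int) < (numeros.count k : Int))) with
  | nil => simp
  | cons k ks =>
      rw [List.map_cons, List.map_cons, if_neg (by simp), PySem.List.max?_id_cons]
      simp only [Option.getD_some]
      rw [List.foldl_cons,
          show pvUpd none (k * (numeros.count k : Int)) = some (k * (numeros.count k : Int))
            from rfl,
          foldl_pvUpd_some]
      rfl

-- ===== VERDICT (by name: the statement is the Claim_ definition above) =====
theorem maior_soma_repetidos_spec : Claim_equal_maior_soma_repetidos := by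
  intro numeros _
  unfold Spec_maior_soma_repetidos
  rw [maior_A_eq]
  simp only [maior_soma_repetidos_alt]
  cases hs : PySem.List.sorted numeros (fun v => v) false with
  | nil =>
      have hnil : numeros = [] := (PySem.List.sorted_eq_nil_iff numeros _ false).mp hs
      subst hnil
      rfl
  | cons x t =>
      have hpw : (x :: t).Pairwise (· ≤ ·) := by
        have := PySem.List.sorted_pairwise numeros (fun v => v)
        rw [hs] at this
        exact this
      have hstep : pvStep (none, none, 0) x = (none, some x, 1) := by
        simp [pvStep, pvFlush]
      rw [List.foldl_cons, hstep]
      have hscan := pvScan t none x 1 hpw.of_cons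
        (fun y hy => List.rel_of_pairwise_cons hpw hy) le_rfl
      simp only at hscan
      rw [hscan]
      have hprods : ((if (1 : Int) < 1 + (t.count x : Int)
            then [x * (1 + (t.count x : Int))] else []) ++
          pvProds (t.filter (fun y => !(y == x)))) = pvProds (x :: t) :=
        (pvProds_cons x t).symm
      rw [hprods]
      have hperm : (pvProds (x :: t)).Perm
          (((PySem.Set.ofList numeros).filter
              (fun k => decide ((1 : Int) < (numeros.count k : Int)))).map
            (fun k => k * (numeros.count k : Int))) := by
        have := pvProds_sorted_perm numeros
        rw [hs] at this
        exact this
      rw [@List.Perm.foldl_eq _ _ pvUpd _ _ ⟨pvUpd_rcomm⟩ hperm none]
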